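-- pv_equiv track=rewrite | github.com/davidmorton0/aoc2024 | 2025/day10/solve.py | calculate_equations
-- ===== SOURCE A (Python) =====
-- def calculate_equations(buttons, joltage):
--     arrays = []
--     for n in range(0, len(joltage)):
--         array = []
--         for button in buttons:
--             if n in button:
--                 array.append(1)
--             else:
--                 array.append(0)
--         array.append(joltage[n])
--         arrays.append(array)
--     # arrays.append(joltage)
--     return arrays
-- ===== SOURCE B (Python) =====
-- def calculate_equations(buttons, joltage):
--     m = len(joltage)
--     arrays = [[0] * len(buttons) for _ in range(m)]
--     for j, button in enumerate(buttons):
--         for n in button: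
--             if 0 <= n < m:
--                 arrays[n][j] = 1
--     return [row + [v] for row, v in zip(arrays, joltage)]
-- ===== Notes on version B (the rewrite author's own statement) =====
-- stated objective: faster
-- what changed: Replaces the per-cell membership test (for every joltage index n scan every button list with 'n in button') by a scatter: preallocate a zero matrix and, for each button element that is an in-range index, set the single cell arrays[n][j] = 1, then append joltage[n] to each row.
import Mathlib
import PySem

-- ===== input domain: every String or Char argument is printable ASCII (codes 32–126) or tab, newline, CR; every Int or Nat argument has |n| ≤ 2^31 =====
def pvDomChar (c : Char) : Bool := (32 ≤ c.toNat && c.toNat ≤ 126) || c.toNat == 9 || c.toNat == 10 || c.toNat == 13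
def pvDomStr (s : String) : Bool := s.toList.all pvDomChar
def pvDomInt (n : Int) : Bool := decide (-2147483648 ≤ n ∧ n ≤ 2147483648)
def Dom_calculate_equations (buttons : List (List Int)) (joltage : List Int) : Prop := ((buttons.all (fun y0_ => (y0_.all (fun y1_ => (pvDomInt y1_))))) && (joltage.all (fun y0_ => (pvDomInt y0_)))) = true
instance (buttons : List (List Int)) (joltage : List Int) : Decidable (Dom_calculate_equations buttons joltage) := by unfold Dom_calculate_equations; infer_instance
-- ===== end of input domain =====

-- ===== PORT A =====
-- B changes the algorithm: instead of testing 'n in button' for every (row, button)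
-- pair, it preallocates a zero matrix and scatters a 1 per in-range button element.
def calculate_equations (buttons : List (List Int)) (joltage : List Int) : List (List Int) :=
  (PySem.List.pyRange 0 (joltage.length : Int) 1).foldl
    (fun arrays n =>
      arrays ++
        [(buttons.foldl (fun array button => array ++ [if n ∈ button then (1 : Int) else 0]) []) ++
          [PySem.List.pyGetD joltage n 0]])
    []

-- ===== PORT B =====
-- arrays[n][j] = 1, guarded by 0 <= n < m (so the write is always in range)
def pvScatter (m : Int) (j : Int) (g : List (List Int)) (n : Int) : List (List Int) :=
  if 0 ≤ n ∧ n < m then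
    PySem.List.pySetD g n (PySem.List.pySetD (PySem.List.pyGetD g n []) j 1)
  else g

def calculate_equations_alt (buttons : List (List Int)) (joltage : List Int) : List (List Int) :=
  List.zipWith (fun row v => row ++ [v])
    ((PySem.List.enumerate buttons 0).foldl
      (fun g jb => jb.2.foldl (pvScatter (joltage.length : Int) jb.1) g)
      (List.replicate joltage.length (List.replicate buttons.length (0 : Int))))
    joltage

-- ===== PRECONDITION & SPEC =====
def Spec_calculate_equations (buttons : List (List Int)) (joltage : List Int) (out : List (List Int)) : Prop := out = calculate_equations_alt buttons joltage
instance (buttons : List (List Int)) (joltage : List Int) (out : List (List Int)) : Decidable (Spec_calculate_equations buttons joltage out) := by unfold Spec_calculate_equations; infer_instance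

-- ===== CLAIM (what is proved, stated in full; the proofs are below) =====
def Claim_equal_calculate_equations : Prop := ∀ (buttons : List (List Int)) (joltage : List Int), Dom_calculate_equations buttons joltage → Spec_calculate_equations buttons joltage (calculate_equations buttons joltage)

-- ===== LEMMAS AND PROOFS =====

-- the common normal form of a matrix row (without the appended joltage entry)
def pvRow (buttons : List (List Int)) (i : Nat) : List Int :=
  buttons.map (fun b => if (i : Int) ∈ b then (1 : Int) else 0)

-- A reduces to the normal form
lemma pvA_eq (buttons : List (List Int)) (joltage : List Int) :
    calculate_equations buttons joltage =
      (List.range joltage.length).map (fun i => pvRow buttons i ++ [joltage.getD i 0]) := by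
  unfold calculate_equations
  rw [PySem.List.foldl_append_singleton_eq_map, PySem.List.pyRange_zero_nat, List.map_map]
  simp only [List.nil_append, Function.comp_def, PySem.List.foldl_append_singleton_eq_map,
    PySem.List.pyGetD_natCast, pvRow]

-- scattering one button leaves the number of rows unchanged
lemma pvScatter_button_length (b : List Int) (m j : Int) (g : List (List Int)) :
    (b.foldl (pvScatter m j) g).length = g.length := by
  induction b generalizing g with
  | nil => rfl
  | cons n rest ih =>
    simp only [List.foldl_cons, ih]
    unfold pvScatter
    split
    · exact PySem.List.length_pySetD ..
    · rfl

-- scattering one button acts on each row independently: row i gets position j set to 1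
-- exactly when i is a member of the button
lemma pvScatter_button (b : List Int) (jn : Nat) (g : List (List Int)) (i : Nat) :
    (b.foldl (pvScatter (g.length : Int) (jn : Int)) g)[i]? =
      (g[i]?).map (fun r => if (i : Int) ∈ b then r.set jn 1 else r) := by
  induction b generalizing g with
  | nil => cases h : g[i]? <;> simp [h]
  | cons n rest ih =>
    simp only [List.foldl_cons]
    by_cases hn : 0 ≤ n ∧ n < (g.length : Int)
    · have hlt : n.toNat < g.length := by omega
      have hstep : pvScatter (g.length : Int) (jn : Int) g n =
          g.set n.toNat ((g[n.toNat]).set jn 1) := by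
        unfold pvScatter
        rw [if_pos hn, PySem.List.pyGetD_eq_getElem g [] hn.1 hn.2,
            PySem.List.pySetD_natCast, PySem.List.pySetD_of_nonneg _ _ hn.1]
      rw [hstep]
      have ih' := ih (g.set n.toNat ((g[n.toNat]).set jn 1))
      simp only [List.length_set] at ih'
      rw [ih']
      by_cases hi : i = n.toNat
      · rw [hi]
        have hmemn : ((n.toNat : Nat) : Int) ∈ n :: rest := by
          have : ((n.toNat : Nat) : Int) = n := by omega
          simp [this]
        simp only [List.getElem?_set, if_pos hlt,
          List.getElem?_eq_getElem hlt, if_pos hmemn, Option.map_some]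
        by_cases hr : ((n.toNat : Nat) : Int) ∈ rest <;> simp [List.set_set]
      · have hne : (i : Int) ≠ n := by omega
        have hmem : ((i : Int) ∈ n :: rest) = ((i : Int) ∈ rest) := by simp [hne]
        simp [Ne.symm hi, hmem]
    · have hstep : pvScatter (g.length : Int) (jn : Int) g n = g := by
        unfold pvScatter; rw [if_neg hn]
      rw [hstep, ih]
      cases h : g[i]? with
      | none => simp
      | some r =>
        obtain ⟨hi, -⟩ := List.getElem?_eq_some_iff.mp h
        have hne : (i : Int) ≠ n := by omega
        simp [hne]

-- the per-row effect of the whole scatter fold, as a plain recursion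
def pvFill (r : List Int) (s : Nat) (bs : List (List Int)) (i : Nat) : List Int :=
  match bs with
  | [] => r
  | b :: rest => pvFill (if (i : Int) ∈ b then r.set s 1 else r) (s + 1) rest i

-- the scatter fold over all (index, button) pairs acts rowwise, each row evolving by pvFill
lemma pvScatter_fold (bs : List (List Int)) (sn : Nat) (m : Int) (g : List (List Int)) (i : Nat)
    (hm : (g.length : Int) = m) :
    ((PySem.List.enumerate bs (sn : Int)).foldl
        (fun g jb => jb.2.foldl (pvScatter m jb.1) g) g)[i]? =
      (g[i]?).map (fun r => pvFill r sn bs i) := by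
  induction bs generalizing sn g with
  | nil =>
    cases h : g[i]? <;> simp [PySem.List.enumerate_nil, pvFill, h]
  | cons b rest ih =>
    rw [PySem.List.enumerate_cons]
    simp only [List.foldl_cons]
    have hs1 : (sn : Int) + 1 = ((sn + 1 : Nat) : Int) := by push_cast; ring
    have hlen : ((b.foldl (pvScatter m (sn : Int)) g).length : Int) = m := by
      rw [pvScatter_button_length]; exact hm
    rw [hs1, ih _ _ hlen]
    rw [← hm] at *
    rw [pvScatter_button b sn g i]
    cases h : g[i]? <;> simp [pvFill]

-- pvFill on an all-zero suffix produces exactly the indicator row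
lemma pvFill_replicate (bs : List (List Int)) (s : Nat) (r : List Int) (i : Nat)
    (hlen : r.length = s + bs.length) (hdrop : r.drop s = List.replicate bs.length 0) :
    pvFill r s bs i = r.take s ++ pvRow bs i := by
  induction bs generalizing s r with
  | nil =>
    simp only [pvFill, pvRow, List.map_nil, List.append_nil]
    rw [List.take_of_length_le (by simp at hlen; omega)]
  | cons b rest ih =>
    have hlen1 : r.length = s + rest.length + 1 := by simp at hlen; omega
    have hs : s < r.length := by omega
    have hr0 : r[s] = 0 := by
      have := congrArg (fun l => l[0]?) hdrop
      simp [List.getElem?_drop, List.getElem?_eq_getElem hs] at this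
      simpa using this
    simp only [pvFill, pvRow, List.map_cons]
    set r' := if (i : Int) ∈ b then r.set s 1 else r with hr'
    have hlen' : r'.length = (s + 1) + rest.length := by
      rw [hr']; split
      · rw [List.length_set]; omega
      · omega
    have hdrop' : r'.drop (s + 1) = List.replicate rest.length 0 := by
      have hd : r.drop (s + 1) = List.replicate rest.length 0 := by
        have := congrArg (fun l => l.drop 1) hdrop
        simpa [List.drop_drop] using this
      rw [hr']; split
      · rw [List.drop_set, if_pos (by omega)]; exact hd
      · exact hd
    rw [ih (s + 1) r' hlen' hdrop']
    have htake : r'.take (s + 1) = r.take s ++ [if (i : Int) ∈ b then (1 : Int) else 0] := by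
      rw [hr']; split
      · rw [List.take_add_one, List.take_set,
          List.set_eq_of_length_le (by simp),
          List.getElem?_set_self hs]
        rfl
      · rw [List.take_add_one, List.getElem?_eq_getElem hs, hr0]
        rfl
    rw [htake, List.append_assoc]
    rfl

-- the zipWith that appends the joltage entry, in normal form
lemma pvZip (xs : List Int) (gfn : Nat → List Int) :
    List.zipWith (fun row v => row ++ [v]) ((List.range xs.length).map gfn) xs =
      (List.range xs.length).map (fun i => gfn i ++ [xs.getD i 0]) := by
  apply List.ext_getElem
  · simp
  · intro i h1 h2
    have hi : i < xs.length := by simpa using h2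
    simp [List.getElem_zipWith, List.getD_eq_getElem?_getD, List.getElem?_eq_getElem hi]

-- B reduces to the same normal form
lemma pvB_eq (buttons : List (List Int)) (joltage : List Int) :
    calculate_equations_alt buttons joltage =
      (List.range joltage.length).map (fun i => pvRow buttons i ++ [joltage.getD i 0]) := by
  unfold calculate_equations_alt
  have hgeq : (PySem.List.enumerate buttons 0).foldl
      (fun g jb => jb.2.foldl (pvScatter (joltage.length : Int) jb.1) g)
      (List.replicate joltage.length (List.replicate buttons.length (0 : Int))) =
      (List.range joltage.length).map (fun i => pvRow buttons i) := by
    apply List.ext_getElem?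
    intro i
    rw [show (0 : Int) = ((0 : Nat) : Int) from rfl,
      pvScatter_fold buttons 0 (joltage.length : Int) _ i (by simp)]
    by_cases hi : i < joltage.length
    · rw [List.getElem?_eq_getElem (by simpa using hi)]
      simp only [List.getElem_replicate, Option.map_some]
      rw [pvFill_replicate buttons 0 _ i (by simp) (by simp)]
      simp [hi]
    · rw [List.getElem?_eq_none_iff.mpr (by simpa using not_lt.mp hi),
          List.getElem?_eq_none_iff.mpr (by simpa using not_lt.mp hi)]
      simp
  rw [hgeq]
  exact pvZip joltage (fun i => pvRow buttons i)

-- ===== VERDICT (by name: the statement is the Claim_ definition above) =====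
theorem calculate_equations_spec : Claim_equal_calculate_equations := by
  intro buttons joltage _
  unfold Spec_calculate_equations
  rw [pvA_eq, pvB_eq]
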